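-- pv_equiv track=rewrite | github.com/tornow-nadir/RaySession | src/shared/ray.py | isGitTaggable
-- ===== SOURCE A (Python) =====
-- def isGitTaggable(string):
--     if not string:
--         return False
--
--     if string.startswith('/'):
--         return False
--
--     if string.endswith('/'):
--         return False
--
--     if string.endswith('.'):
--         return False
--
--     for forbidden in (' ', '~', '^', ':', '?', '*',
--                       '[', '..', '@{', '\\', '//', ','):
--         if forbidden in string:
--             return False
--
--     if string == "@":
--         return False
--
--     return True
-- ===== SOURCE B (Python) =====
-- def isGitTaggable(string):
--     if not string or string == '@':
--         return False
--     if string[0] == '/' or string[-1] in '/.':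
--         return False
--     prev = ''
--     for ch in string:
--         if ch in ' ~^:?*[\\,':
--             return False
--         if (prev, ch) in (('.', '.'), ('@', '{'), ('/', '/')):
--             return False
--         prev = ch
--     return True
-- ===== Notes on version B (the rewrite author's own statement) =====
-- stated objective: alternative
-- what changed: Replaced the chain of guards plus a loop of substring-containment scans (one scan per forbidden pattern) with a single left-to-right pass over the characters that keeps the previous character to detect the forbidden two-character pairs, checking forbidden single characters against one character class.
import Mathlib
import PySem

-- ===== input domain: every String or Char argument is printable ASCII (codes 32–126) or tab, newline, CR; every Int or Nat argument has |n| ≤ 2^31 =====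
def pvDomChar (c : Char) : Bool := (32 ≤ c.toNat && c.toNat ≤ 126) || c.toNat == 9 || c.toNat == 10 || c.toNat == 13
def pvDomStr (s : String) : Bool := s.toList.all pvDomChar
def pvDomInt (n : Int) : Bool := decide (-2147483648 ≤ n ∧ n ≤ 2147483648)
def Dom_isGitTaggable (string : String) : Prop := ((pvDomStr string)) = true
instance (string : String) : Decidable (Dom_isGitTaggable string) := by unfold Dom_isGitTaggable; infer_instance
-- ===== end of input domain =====

-- B replaces A's per-pattern substring scans with a single left-to-right pass that keeps the previous character (alternative decomposition, same cost class).

-- ===== PORT A =====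
def isGitTaggable (string : String) : Bool :=
  if string == "" then false
  else if PySem.Str.startswith string "/" then false
  else if PySem.Str.endswith string "/" then false
  else if PySem.Str.endswith string "." then false
  else if ([" ", "~", "^", ":", "?", "*", "[", "..", "@{", "\\", "//", ","].any
            fun forbidden => PySem.Str.isIn forbidden string) then false
  else if string == "@" then false
  else true

-- ===== PORT B =====
-- the loop of Source B; `prev` is `none` before the first iteration (Python's initial '')
def pvAltLoop : Option Char → List Char → Bool
  | _, [] => true
  | prev, ch :: rest =>
    if ([' ', '~', '^', ':', '?', '*', '[', '\\', ','].contains ch) then false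
    else if ([(some '.', '.'), (some '@', '{'), (some '/', '/')].contains (prev, ch)) then false
    else pvAltLoop (some ch) rest

def isGitTaggable_alt (string : String) : Bool :=
  let cs := string.toList
  if cs.isEmpty || cs == ['@'] then false
  else if cs.head? == some '/' || cs.getLast? == some '/' || cs.getLast? == some '.' then false
  else pvAltLoop none cs

-- ===== PRECONDITION & SPEC =====
def Spec_isGitTaggable (string : String) (out : Bool) : Prop := out = isGitTaggable_alt string
instance (string : String) (out : Bool) : Decidable (Spec_isGitTaggable string out) := by unfold Spec_isGitTaggable; infer_instance

-- ===== CLAIM (what is proved, stated in full; the proofs are below) =====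
def Claim_equal_isGitTaggable : Prop := ∀ (string : String), Dom_isGitTaggable string → Spec_isGitTaggable string (isGitTaggable string)

-- ===== LEMMAS AND PROOFS =====

-- adjacency detector: `pvHasPair a b l` iff the two-char pattern [a, b] occurs in l
def pvHasPair (a b : Char) : List Char → Bool
  | x :: y :: rest => (x == a && y == b) || pvHasPair a b (y :: rest)
  | _ => false

theorem pv_infix_singleton (c : Char) (l : List Char) : [c] <:+: l ↔ c ∈ l := by
  constructor
  · rintro ⟨s, t, rfl⟩; simp
  · intro h
    obtain ⟨s, t, rfl⟩ := List.mem_iff_append.mp h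
    exact ⟨s, t, by simp⟩

theorem pv_infix_pair (a b : Char) (l : List Char) :
    [a, b] <:+: l ↔ pvHasPair a b l = true := by
  induction l with
  | nil => simp [pvHasPair]
  | cons x rest ih =>
    cases rest with
    | nil =>
      simp only [pvHasPair]
      constructor
      · rintro ⟨s, t, h⟩
        have := congrArg List.length h; simp at this; omega
      · intro h; simp at h
    | cons y rest' =>
      constructor
      · rintro ⟨s, t, h⟩
        cases s with
        | nil =>
          simp at h
          simp [pvHasPair, h.1, h.2.1]
        | cons s0 s' =>
          simp only [List.cons_append, List.cons.injEq] at h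
          have : [a, b] <:+: y :: rest' := ⟨s', t, h.2⟩
          simp [pvHasPair, (ih.mp this)]
      · intro h
        simp only [pvHasPair, Bool.or_eq_true, Bool.and_eq_true, beq_iff_eq] at h
        rcases h with ⟨rfl, rfl⟩ | h
        · exact ⟨[], rest', rfl⟩
        · exact (ih.mpr h).trans (List.suffix_cons x _).isInfix

theorem pv_suffix_singleton (c : Char) (l : List Char) : [c] <:+ l ↔ l.getLast? = some c := by
  constructor
  · rintro ⟨s, rfl⟩; simp
  · intro h
    obtain ⟨s, rfl⟩ := List.getLast?_eq_some_iff.mp h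
    exact ⟨s, rfl⟩

theorem pv_prefix_singleton (c : Char) (l : List Char) : [c] <+: l ↔ l.head? = some c := by
  cases l with
  | nil => simp
  | cons x rest =>
    constructor
    · rintro ⟨s, h⟩; simp only [List.cons_append, List.cons.injEq] at h; simp [h.1]
    · intro h; simp at h; exact ⟨rest, by simp [h]⟩

set_option maxHeartbeats 1000000 in
theorem pvAltLoop_some (p : Char) (cs : List Char) :
    pvAltLoop (some p) cs =
      (!cs.any (fun c => ([' ', '~', '^', ':', '?', '*', '[', '\\', ','].contains c)) &&
       !pvHasPair '.' '.' (p :: cs) && !pvHasPair '@' '{' (p :: cs) && !pvHasPair '/' '/' (p :: cs)) := by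
  induction cs generalizing p with
  | nil => simp [pvAltLoop, pvHasPair]
  | cons c rest ih =>
    rw [Bool.eq_iff_iff]
    simp only [pvAltLoop, ih]
    by_cases h1 : ([' ', '~', '^', ':', '?', '*', '[', '\\', ','].contains c) = true
    · rw [if_pos h1]
      simp only [List.any_cons, h1, Bool.true_or, Bool.not_true, Bool.false_and]
    · rw [if_neg h1]
      by_cases h2 : ([(some '.', '.'), (some '@', '{'), (some '/', '/')].contains ((some p : Option Char), c)) = true
      · rw [if_pos h2]
        simp only [List.contains_cons, List.contains_nil, Bool.or_eq_true, beq_iff_eq,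
          Prod.mk.injEq, Option.some.injEq] at h2
        rcases h2 with ⟨rfl, rfl⟩ | ⟨rfl, rfl⟩ | ⟨rfl, rfl⟩ | h
        · simp [pvHasPair]
        · simp [pvHasPair]
        · simp [pvHasPair]
        · simp at h
      · rw [if_neg h2]
        simp only [List.contains_cons, List.contains_nil, Bool.or_eq_true, beq_iff_eq,
          Prod.mk.injEq, Option.some.injEq, not_or, not_and] at h1 h2
        simp only [List.any_cons, pvHasPair, Bool.and_eq_true, Bool.not_eq_true',
          Bool.or_eq_false_iff, Bool.and_eq_false_iff, beq_eq_false_iff_ne, ne_eq,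
          List.any_eq_false, List.contains_cons, List.contains_nil]
        tauto

set_option maxHeartbeats 1000000 in
theorem pvAltLoop_none (cs : List Char) :
    pvAltLoop none cs =
      (!cs.any (fun c => ([' ', '~', '^', ':', '?', '*', '[', '\\', ','].contains c)) &&
       !pvHasPair '.' '.' cs && !pvHasPair '@' '{' cs && !pvHasPair '/' '/' cs) := by
  cases cs with
  | nil => simp [pvAltLoop, pvHasPair]
  | cons c rest =>
    rw [Bool.eq_iff_iff]
    simp only [pvAltLoop, pvAltLoop_some]
    by_cases h1 : ([' ', '~', '^', ':', '?', '*', '[', '\\', ','].contains c) = true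
    · rw [if_pos h1]
      simp only [List.any_cons, h1, Bool.true_or, Bool.not_true, Bool.false_and]
    · rw [if_neg h1]
      rw [if_neg (by simp)]
      simp only [List.contains_cons, List.contains_nil, Bool.or_eq_true, beq_iff_eq, not_or] at h1
      simp only [List.any_cons, pvHasPair, Bool.and_eq_true, Bool.not_eq_true',
        Bool.or_eq_false_iff, Bool.and_eq_false_iff, beq_eq_false_iff_ne, ne_eq,
        List.any_eq_false, List.contains_cons, List.contains_nil]
      tauto

theorem pv_all_mem (l : List Char) :
    (∀ x ∈ l, ¬x = ' ' ∧ ¬x = '~' ∧ ¬x = '^' ∧ ¬x = ':' ∧ ¬x = '?' ∧ ¬x = '*' ∧ ¬x = '[' ∧ ¬x = '\\' ∧ ¬x = ',') ↔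
    (' ' ∉ l ∧ '~' ∉ l ∧ '^' ∉ l ∧ ':' ∉ l ∧ '?' ∉ l ∧ '*' ∉ l ∧ '[' ∉ l ∧ '\\' ∉ l ∧ ',' ∉ l) := by
  constructor
  · intro h
    exact ⟨fun hm => (h _ hm).1 rfl, fun hm => (h _ hm).2.1 rfl, fun hm => (h _ hm).2.2.1 rfl,
      fun hm => (h _ hm).2.2.2.1 rfl, fun hm => (h _ hm).2.2.2.2.1 rfl, fun hm => (h _ hm).2.2.2.2.2.1 rfl,
      fun hm => (h _ hm).2.2.2.2.2.2.1 rfl, fun hm => (h _ hm).2.2.2.2.2.2.2.1 rfl,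
      fun hm => (h _ hm).2.2.2.2.2.2.2.2 rfl⟩
  · rintro ⟨a1, a2, a3, a4, a5, a6, a7, a8, a9⟩ x hx
    refine ⟨?_, ?_, ?_, ?_, ?_, ?_, ?_, ?_, ?_⟩ <;> rintro rfl <;> tauto

set_option maxHeartbeats 2000000 in
theorem pvA_iff (s : String) : isGitTaggable s = true ↔
    (s.toList ≠ [] ∧ s.toList.head? ≠ some '/' ∧ s.toList.getLast? ≠ some '/' ∧ s.toList.getLast? ≠ some '.'
     ∧ ¬(' ' ∈ s.toList ∨ '~' ∈ s.toList ∨ '^' ∈ s.toList ∨ ':' ∈ s.toList ∨ '?' ∈ s.toList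
         ∨ '*' ∈ s.toList ∨ '[' ∈ s.toList ∨ '\\' ∈ s.toList ∨ ',' ∈ s.toList)
     ∧ pvHasPair '.' '.' s.toList = false ∧ pvHasPair '@' '{' s.toList = false ∧ pvHasPair '/' '/' s.toList = false
     ∧ s.toList ≠ ['@']) := by
  have e0 : ("" : String).toList = [] := by decide
  have e1 : ("/" : String).toList = ['/'] := by decide
  have e2 : (".").toList = ['.'] := by decide
  have e3 : (" ").toList = [' '] := by decide
  have e4 : ("~").toList = ['~'] := by decide
  have e5 : ("^").toList = ['^'] := by decide
  have e6 : (":").toList = [':'] := by decide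
  have e7 : ("?").toList = ['?'] := by decide
  have e8 : ("*").toList = ['*'] := by decide
  have e9 : ("[").toList = ['['] := by decide
  have e10 : ("..").toList = ['.', '.'] := by decide
  have e11 : ("@{").toList = ['@', '{'] := by decide
  have e12 : ("\\").toList = ['\\'] := by decide
  have e13 : ("//").toList = ['/', '/'] := by decide
  have e14 : (",").toList = [','] := by decide
  have e15 : ("@").toList = ['@'] := by decide
  unfold isGitTaggable
  split_ifs with h1 h2 h3 h4 h5 h6 <;>
    simp only [beq_iff_eq, ← String.toList_inj, List.any_cons, List.any_nil, Bool.or_eq_true,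
      PySem.Str.isIn_iff_infix, PySem.Str.startswith_eq, PySem.Str.endswith_eq,
      PySem.Chars.startswith_iff, PySem.Chars.endswith_iff,
      e0, e1, e2, e3, e4, e5, e6, e7, e8, e9, e10, e11, e12, e13, e14, e15,
      pv_prefix_singleton, pv_suffix_singleton, pv_infix_singleton, pv_infix_pair,
      ne_eq, false_iff, true_iff, not_or, Bool.eq_false_iff] at * <;>
    tauto

set_option maxHeartbeats 2000000 in
theorem pvB_iff (s : String) : isGitTaggable_alt s = true ↔
    (s.toList ≠ [] ∧ s.toList.head? ≠ some '/' ∧ s.toList.getLast? ≠ some '/' ∧ s.toList.getLast? ≠ some '.'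
     ∧ ¬(' ' ∈ s.toList ∨ '~' ∈ s.toList ∨ '^' ∈ s.toList ∨ ':' ∈ s.toList ∨ '?' ∈ s.toList
         ∨ '*' ∈ s.toList ∨ '[' ∈ s.toList ∨ '\\' ∈ s.toList ∨ ',' ∈ s.toList)
     ∧ pvHasPair '.' '.' s.toList = false ∧ pvHasPair '@' '{' s.toList = false ∧ pvHasPair '/' '/' s.toList = false
     ∧ s.toList ≠ ['@']) := by
  unfold isGitTaggable_alt
  simp only [pvAltLoop_none]
  split_ifs with h1 h2 <;>
    simp only [Bool.or_eq_true, Bool.and_eq_true, Bool.not_eq_true', Bool.eq_false_iff,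
      List.isEmpty_iff, beq_iff_eq, List.any_eq_true, List.contains_cons, List.contains_nil,
      Bool.or_eq_false_iff, ne_eq, false_iff, true_iff, not_or, not_exists, not_and,
      Bool.false_eq_true, not_false_iff, and_true, pv_all_mem] at * <;>
    tauto

theorem pv_main (string : String) : isGitTaggable string = isGitTaggable_alt string := by
  rw [Bool.eq_iff_iff, pvA_iff, pvB_iff]

-- ===== VERDICT (by name: the statement is the Claim_ definition above) =====
theorem isGitTaggable_spec : Claim_equal_isGitTaggable := by
  intro string _
  unfold Spec_isGitTaggable
  exact pv_main string
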